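-- pv_equiv track=rewrite | github.com/bgjhc/io-xray-cpp | token.py | token_pc
-- ===== SOURCE A (Python) =====
-- def token_pc(code: list[str]):
--     '''
--     用于分析每行token的起始与终止位置
--     '''
--     pc_list=[]
--     hi=0
--     pc=0
--     for i in range(len(code)):
--         if code[i]=='\n':
--             pc+=1
--             pc_list.append( (hi,i,pc) )
--             hi=i+1
--     return pc_list
-- ===== SOURCE B (Python) =====
-- def token_pc(code: list[str]):
--     positions = [i for i, c in enumerate(code) if c == '\n']
--     return [((positions[k - 1] + 1) if k else 0, positions[k], k + 1)
--             for k in range(len(positions))]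
-- ===== Notes on version B (the rewrite author's own statement) =====
-- stated objective: alternative
-- what changed: Replaces the single stateful loop tracking hi and pc with two passes: collect all newline indices, then derive each tuple from adjacent indices in that table.
import Mathlib
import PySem

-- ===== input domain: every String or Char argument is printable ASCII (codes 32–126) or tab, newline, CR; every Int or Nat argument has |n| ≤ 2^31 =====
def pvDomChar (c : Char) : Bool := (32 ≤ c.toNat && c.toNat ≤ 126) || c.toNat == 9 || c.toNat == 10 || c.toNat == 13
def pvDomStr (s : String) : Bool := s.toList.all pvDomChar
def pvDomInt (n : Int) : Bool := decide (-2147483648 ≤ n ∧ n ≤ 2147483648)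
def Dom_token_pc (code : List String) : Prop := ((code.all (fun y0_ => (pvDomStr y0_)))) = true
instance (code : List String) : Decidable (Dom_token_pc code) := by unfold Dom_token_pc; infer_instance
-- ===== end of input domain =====

-- B is an alternative decomposition (newline-index table + relational pass), same value everywhere; return value only, no mutation.

-- ===== PORT A =====
-- A's loop over i in range(len(code)) with state (pc_list, hi, pc), as the obvious structural recursion
def tokenLoopA (cs : List String) (i hi pc : Int) (acc : List (Int × Int × Int)) :
    List (Int × Int × Int) :=
  match cs with
  | [] => acc
  | c :: rest =>
      if c == "\n" then tokenLoopA rest (i + 1) (i + 1) (pc + 1) (acc ++ [(hi, i, pc + 1)])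
      else tokenLoopA rest (i + 1) hi pc acc

def token_pc (code : List String) : List (Int × Int × Int) :=
  tokenLoopA code 0 0 0 []

-- ===== PORT B =====
-- positions = [i for i, c in enumerate(code) if c == '\n']
def newlinePositions (code : List String) : List Int :=
  ((PySem.List.enumerate code).filter (fun p => p.2 == "\n")).map (fun p => p.1)

-- [((positions[k-1]+1) if k else 0, positions[k], k+1) for k in range(len(positions))]
def token_pc_alt (code : List String) : List (Int × Int × Int) :=
  let positions := newlinePositions code
  (List.range positions.length).map (fun k =>
    (if k = 0 then 0 else positions.getD (k - 1) 0 + 1, positions.getD k 0, (k : Int) + 1))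

-- ===== PRECONDITION & SPEC =====
def Spec_token_pc (code : List String) (out : List (Int × Int × Int)) : Prop := out = token_pc_alt code
instance (code : List String) (out : List (Int × Int × Int)) : Decidable (Spec_token_pc code out) := by unfold Spec_token_pc; infer_instance

-- ===== CLAIM (what is proved, stated in full; the proofs are below) =====
def Claim_equal_token_pc : Prop := ∀ (code : List String), Dom_token_pc code → Spec_token_pc code (token_pc code)

-- ===== LEMMAS AND PROOFS =====

-- common reference: build the answer from the list of newline positions
def build (prev n : Int) : List Int → List (Int × Int × Int)
  | [] => []
  | p :: ps => (prev, p, n) :: build (p + 1) (n + 1) ps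

-- newline positions of cs when indexing starts at i
def posFrom (i : Int) : List String → List Int
  | [] => []
  | c :: cs => if c == "\n" then i :: posFrom (i + 1) cs else posFrom (i + 1) cs

theorem newlinePositions_eq_posFrom (code : List String) :
    ∀ i : Int, ((PySem.List.enumerate code i).filter (fun p => p.2 == "\n")).map (fun p => p.1) =
      posFrom i code := by
  induction code with
  | nil => intro i; simp [PySem.List.enumerate_nil, posFrom]
  | cons c cs ih =>
      intro i
      simp only [PySem.List.enumerate_cons, List.filter_cons, posFrom]
      by_cases h : c == "\n"
      · simp [h, ih]
      · simp [h, ih]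

theorem tokenLoopA_eq_build (cs : List String) :
    ∀ (i hi pc : Int) (acc : List (Int × Int × Int)),
      tokenLoopA cs i hi pc acc = acc ++ build hi (pc + 1) (posFrom i cs) := by
  induction cs with
  | nil => intro i hi pc acc; simp [tokenLoopA, posFrom, build]
  | cons c rest ih =>
      intro i hi pc acc
      simp only [tokenLoopA, posFrom]
      by_cases h : c == "\n"
      · simp only [h]
        rw [ih]
        simp [build]
      · simp only [h]
        rw [if_neg (by simp_all), if_neg (by simp_all), ih]

theorem map_range_eq_build (ps : List Int) :
    ∀ (prev n : Int),
      (List.range ps.length).map (fun k =>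
        (if k = 0 then prev else ps.getD (k - 1) 0 + 1, ps.getD k 0, n + (k : Int))) =
      build prev n ps := by
  induction ps with
  | nil => intro prev n; simp [build]
  | cons p ps ih =>
      intro prev n
      rw [List.length_cons, List.range_succ_eq_map, List.map_cons, List.map_map]
      simp only [build]
      congr 1
      · simp
      · rw [← ih (p + 1) (n + 1)]
        apply List.map_congr_left
        intro k hk
        simp only [Function.comp]
        have h1 : ¬ (k + 1 = 0) := by omega
        simp only [h1, if_false, List.getD_cons_succ]
        have h2 : k + 1 - 1 = k := by omega
        rw [h2]
        refine Prod.ext ?_ (Prod.ext rfl ?_)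
        · by_cases hk0 : k = 0
          · subst hk0; simp [List.getD]
          · obtain ⟨m, rfl⟩ : ∃ m, k = m + 1 := ⟨k - 1, by omega⟩
            simp
        · push_cast; ring

-- ===== VERDICT (by name: the statement is the Claim_ definition above) =====
theorem token_pc_spec : Claim_equal_token_pc := by
  intro code _
  unfold Spec_token_pc token_pc token_pc_alt newlinePositions
  rw [tokenLoopA_eq_build, newlinePositions_eq_posFrom]
  simp only [List.nil_append]
  have h01 : (0 : Int) + 1 = 1 := by norm_num
  rw [h01, ← map_range_eq_build (posFrom 0 code) 0 1]
  apply List.map_congr_left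
  intro k hk
  refine Prod.ext rfl (Prod.ext rfl ?_)
  simp [add_comm]
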